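-- pv_equiv track=rewrite | github.com/300CIS017-Object-Oriented-Programming/proyecto-3-test | src/gestor_archivos.py | _es_nombre_valido
-- ===== SOURCE A (Python) =====
-- def _es_nombre_valido(nombre_archivo):
--     prefijos_validos = ["admitidos", "matriculados", "inscritos", "neos", "graduados"]
--     years_validos = [str(year) for year in range(1990, 2025)]
--
--     if not nombre_archivo.endswith(".xlsx"):
--         return False
--
--     base_name = nombre_archivo.rsplit(".", 1)[0]
--
--     for prefijo in prefijos_validos:
--         if base_name.startswith(prefijo):
--             for year in years_validos:
--                 if base_name.endswith(year):
--                     return True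
--
--     return False
-- ===== SOURCE B (Python) =====
-- def _es_nombre_valido(nombre_archivo):
--     prefijos = ("admitidos", "matriculados", "inscritos", "neos", "graduados")
--     if not nombre_archivo.endswith(".xlsx"):
--         return False
--     base = nombre_archivo[:-5]
--     y = base[-4:]
--     if len(y) != 4:
--         return False
--     ok_year = (y[:3] in ("199", "200", "201") and y[3].isdigit()) or (y[:3] == "202" and y[3] in "01234")
--     if not ok_year:
--         return False
--     return any(base.startswith(p) for p in prefijos)
-- ===== Notes on version B (the rewrite author's own statement) =====
-- stated objective: simpler
-- what changed: A builds the 35 year strings and, per matching prefix, scans all of them with endswith; B never materialises the year list: it drops the 5-character extension, reads the last four characters of the base name once and tests them directly against the pattern 199d|200d|201d|202[0-4], then checks the prefix alternation once.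
import Mathlib
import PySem

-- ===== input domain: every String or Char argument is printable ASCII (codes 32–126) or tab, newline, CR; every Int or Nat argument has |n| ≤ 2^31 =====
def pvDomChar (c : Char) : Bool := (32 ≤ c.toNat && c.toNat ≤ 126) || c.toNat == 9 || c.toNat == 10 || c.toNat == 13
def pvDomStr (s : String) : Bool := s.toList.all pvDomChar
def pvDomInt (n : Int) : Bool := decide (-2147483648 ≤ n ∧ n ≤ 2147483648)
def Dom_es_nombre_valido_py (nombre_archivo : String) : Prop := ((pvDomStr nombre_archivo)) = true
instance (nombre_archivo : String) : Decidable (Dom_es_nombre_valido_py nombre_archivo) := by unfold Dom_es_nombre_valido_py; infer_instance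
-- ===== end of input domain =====

-- B replaces A's scan over the 35 generated year strings by a direct test on the last
-- four characters of the base name (objective: simpler; same return value).

-- ===== PORT A =====
-- hand port of s.rsplit(sep, 1) (PySem has no rsplit): split at the LAST occurrence of sep;
-- exact: [s] when sep is absent, else [s[:i], s[i+1:]] for the last index i of sep.
def pyRsplit1 (cs : List Char) (sep : Char) : List (List Char) :=
  match (cs.reverse.findIdx? (· == sep)) with
  | none => [cs]
  | some i => [(cs.reverse.drop (i + 1)).reverse, (cs.reverse.take i).reverse]

def es_nombre_valido_py (nombre_archivo : String) : Bool :=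
  let prefijos_validos : List String := ["admitidos", "matriculados", "inscritos", "neos", "graduados"]
  let years_validos : List String := (PySem.List.pyRange 1990 2025 1).map PySem.Int.toStr
  if !(PySem.Str.endswith nombre_archivo ".xlsx") then false
  else
    let base_name : List Char := PySem.List.pyGetD (pyRsplit1 nombre_archivo.toList '.') 0 []
    -- the two for-loops with their early 'return True' are the nested any
    prefijos_validos.any (fun prefijo =>
      PySem.Chars.startswith base_name prefijo.toList &&
      years_validos.any (fun year => PySem.Chars.endswith base_name year.toList))

-- ===== PORT B =====
def es_nombre_valido_py_alt (nombre_archivo : String) : Bool :=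
  if !(PySem.Str.endswith nombre_archivo ".xlsx") then false
  else
    let base : List Char := PySem.Chars.slice nombre_archivo.toList none (some (-5))
    let y : List Char := PySem.Chars.slice base (some (-4)) none
    if !(y.length == 4) then false
    else
      let y3 : List Char := PySem.Chars.slice y none (some 3)
      let d : Char := PySem.List.pyGetD y 3 ' '
      let ok_year : Bool :=
        ((y3 == "199".toList || y3 == "200".toList || y3 == "201".toList) && PySem.Chars.isdigit d)
        || (y3 == "202".toList && PySem.Chars.isIn [d] "01234".toList)
      if !ok_year then false
      else
        (["admitidos", "matriculados", "inscritos", "neos", "graduados"] : List String).any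
          (fun p => PySem.Chars.startswith base p.toList)

-- ===== PRECONDITION & SPEC =====
def Spec_es_nombre_valido_py (nombre_archivo : String) (out : Bool) : Prop := out = es_nombre_valido_py_alt nombre_archivo
instance (nombre_archivo : String) (out : Bool) : Decidable (Spec_es_nombre_valido_py nombre_archivo out) := by unfold Spec_es_nombre_valido_py; infer_instance

-- ===== CLAIM (what is proved, stated in full; the proofs are below) =====
def Claim_equal_es_nombre_valido_py : Prop := ∀ (nombre_archivo : String), Dom_es_nombre_valido_py nombre_archivo → Spec_es_nombre_valido_py nombre_archivo (es_nombre_valido_py nombre_archivo)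

-- ===== LEMMAS AND PROOFS =====

lemma char_eq_iff_toNat (d c : Char) : d = c ↔ d.toNat = c.toNat :=
  ⟨fun h => by rw [h], fun h => Char.ext (UInt32.toNat_inj.mp h)⟩

lemma char_le_iff_toNat (d c : Char) : d ≤ c ↔ d.toNat ≤ c.toNat := Iff.rfl

-- A's constant inner year loop factors out of the prefix loop
lemma any_and_const {α : Type} (xs : List α) (f : α → Bool) (b : Bool) :
    xs.any (fun x => f x && b) = (xs.any f && b) := by
  cases b <;> simp

lemma rsplit1_of_suffix (pre : List Char) :
    PySem.List.pyGetD (pyRsplit1 (pre ++ ('.' :: 'x' :: 'l' :: 's' :: 'x' :: [])) '.') 0 [] = pre := by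
  unfold pyRsplit1
  simp [List.findIdx?_cons]

lemma dec199 (a b c d : Char) (t : List Char) :
    ((["1990","1991","1992","1993","1994","1995","1996","1997","1998","1999"] : List String).any
        (fun year => PySem.Chars.endswith (t.reverse ++ [a, b, c, d]) year.toList))
      = (([a,b,c] == "199".toList) && PySem.Chars.isdigit d) := by
  rw [Bool.eq_iff_iff]
  simp [List.any_cons, PySem.Chars.endswith, List.isSuffixOf, List.isPrefixOf, PySem.Chars.isdigit]
  simp only [char_eq_iff_toNat, char_le_iff_toNat, show '0'.toNat = 48 from rfl,
    show '1'.toNat = 49 from rfl, show '2'.toNat = 50 from rfl, show '3'.toNat = 51 from rfl,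
    show '4'.toNat = 52 from rfl, show '5'.toNat = 53 from rfl, show '6'.toNat = 54 from rfl,
    show '7'.toNat = 55 from rfl, show '8'.toNat = 56 from rfl, show '9'.toNat = 57 from rfl]
  omega

lemma dec200 (a b c d : Char) (t : List Char) :
    ((["2000","2001","2002","2003","2004","2005","2006","2007","2008","2009"] : List String).any
        (fun year => PySem.Chars.endswith (t.reverse ++ [a, b, c, d]) year.toList))
      = (([a,b,c] == "200".toList) && PySem.Chars.isdigit d) := by
  rw [Bool.eq_iff_iff]
  simp [List.any_cons, PySem.Chars.endswith, List.isSuffixOf, List.isPrefixOf, PySem.Chars.isdigit]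
  simp only [char_eq_iff_toNat, char_le_iff_toNat, show '0'.toNat = 48 from rfl,
    show '1'.toNat = 49 from rfl, show '2'.toNat = 50 from rfl, show '3'.toNat = 51 from rfl,
    show '4'.toNat = 52 from rfl, show '5'.toNat = 53 from rfl, show '6'.toNat = 54 from rfl,
    show '7'.toNat = 55 from rfl, show '8'.toNat = 56 from rfl, show '9'.toNat = 57 from rfl]
  omega

lemma dec201 (a b c d : Char) (t : List Char) :
    ((["2010","2011","2012","2013","2014","2015","2016","2017","2018","2019"] : List String).any
        (fun year => PySem.Chars.endswith (t.reverse ++ [a, b, c, d]) year.toList))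
      = (([a,b,c] == "201".toList) && PySem.Chars.isdigit d) := by
  rw [Bool.eq_iff_iff]
  simp [List.any_cons, PySem.Chars.endswith, List.isSuffixOf, List.isPrefixOf, PySem.Chars.isdigit]
  simp only [char_eq_iff_toNat, char_le_iff_toNat, show '0'.toNat = 48 from rfl,
    show '1'.toNat = 49 from rfl, show '2'.toNat = 50 from rfl, show '3'.toNat = 51 from rfl,
    show '4'.toNat = 52 from rfl, show '5'.toNat = 53 from rfl, show '6'.toNat = 54 from rfl,
    show '7'.toNat = 55 from rfl, show '8'.toNat = 56 from rfl, show '9'.toNat = 57 from rfl]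
  omega

lemma dec202 (a b c d : Char) (t : List Char) :
    ((["2020","2021","2022","2023","2024"] : List String).any
        (fun year => PySem.Chars.endswith (t.reverse ++ [a, b, c, d]) year.toList))
      = (([a,b,c] == "202".toList) && PySem.Chars.isIn [d] "01234".toList) := by
  have hin : PySem.Chars.isIn [d] "01234".toList = (d ∈ "01234".toList : Bool) := by
    rw [Bool.eq_iff_iff]
    simp [PySem.Chars.isIn_iff_infix, List.singleton_infix_iff]
  rw [Bool.eq_iff_iff, hin]
  simp [List.any_cons, PySem.Chars.endswith, List.isSuffixOf, List.isPrefixOf]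
  simp only [char_eq_iff_toNat, show '0'.toNat = 48 from rfl,
    show '1'.toNat = 49 from rfl, show '2'.toNat = 50 from rfl, show '3'.toNat = 51 from rfl,
    show '4'.toNat = 52 from rfl]
  omega

-- A's year loop over the 35 generated strings, on a base name of length ≥ 4,
-- is exactly B's test on the last four characters
lemma years_any_eq (a b c d : Char) (t : List Char) :
    (((PySem.List.pyRange 1990 2025 1).map PySem.Int.toStr).any
        (fun year => PySem.Chars.endswith (t.reverse ++ [a, b, c, d]) year.toList))
      = ((([a,b,c] == "199".toList || [a,b,c] == "200".toList || [a,b,c] == "201".toList) && PySem.Chars.isdigit d)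
        || ([a,b,c] == "202".toList && PySem.Chars.isIn [d] "01234".toList)) := by
  have hy : ((PySem.List.pyRange 1990 2025 1).map PySem.Int.toStr) =
      (["1990","1991","1992","1993","1994","1995","1996","1997","1998","1999"] : List String)
      ++ ["2000","2001","2002","2003","2004","2005","2006","2007","2008","2009"]
      ++ ["2010","2011","2012","2013","2014","2015","2016","2017","2018","2019"]
      ++ ["2020","2021","2022","2023","2024"] := by decide
  rw [hy, List.any_append, List.any_append, List.any_append, dec199, dec200, dec201, dec202]
  cases PySem.Chars.isdigit d <;>
    cases PySem.Chars.isIn [d] "01234".toList <;>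
      simp [Bool.or_assoc]

lemma years_any_short (pre : List Char) (h : pre.length < 4) :
    (((PySem.List.pyRange 1990 2025 1).map PySem.Int.toStr).any
        (fun year => PySem.Chars.endswith pre year.toList)) = false := by
  rw [List.any_eq_false]
  intro y hy
  rw [Bool.not_eq_true, ← Bool.not_eq_true, PySem.Chars.endswith_iff]
  intro hsuf
  have hlen := hsuf.length_le
  have h4 : y.toList.length = 4 := by fin_cases hy <;> rfl
  omega

theorem main_eq (s : String) : es_nombre_valido_py s = es_nombre_valido_py_alt s := by
  unfold es_nombre_valido_py es_nombre_valido_py_alt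
  by_cases hend : PySem.Str.endswith s ".xlsx" = true
  case neg => simp [Bool.not_eq_true] at hend; simp [hend]
  case pos =>
  simp only [hend, Bool.not_true, Bool.false_eq_true, if_false]
  have hsuf : ".xlsx".toList <:+ s.toList := by
    rw [← PySem.Chars.endswith_iff]
    simpa using hend
  obtain ⟨pre, hpre⟩ := hsuf
  rw [show (".xlsx".toList : List Char) = ('.' :: 'x' :: 'l' :: 's' :: 'x' :: []) from rfl] at hpre
  rw [← hpre, rsplit1_of_suffix]
  have hslice : PySem.Chars.slice (pre ++ ('.' :: 'x' :: 'l' :: 's' :: 'x' :: [])) none (some (-5)) = pre := by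
    rw [PySem.Chars.slice_eq_listSlice, PySem.List.slice_to_neg_ofNat _ 5 (by omega)]
    simp
  rw [hslice]
  rcases hr : pre.reverse with _ | ⟨d, _ | ⟨c, _ | ⟨b, _ | ⟨a, t⟩⟩⟩⟩
  -- base name shorter than every year string: the year loop finds nothing, B's length test fails
  · have hp : pre = [] := by simpa using congrArg List.reverse hr
    subst hp
    rw [any_and_const, years_any_short _ (by simp)]
    simp [PySem.Chars.slice_eq_listSlice, PySem.List.slice_from_neg_ofNat _ 4 (by omega)]
  · have hp : pre = [d] := by simpa using congrArg List.reverse hr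
    subst hp
    rw [any_and_const, years_any_short _ (by simp)]
    simp [PySem.Chars.slice_eq_listSlice, PySem.List.slice_from_neg_ofNat _ 4 (by omega)]
  · have hp : pre = [c, d] := by simpa using congrArg List.reverse hr
    subst hp
    rw [any_and_const, years_any_short _ (by simp)]
    simp [PySem.Chars.slice_eq_listSlice, PySem.List.slice_from_neg_ofNat _ 4 (by omega)]
  · have hp : pre = [b, c, d] := by simpa using congrArg List.reverse hr
    subst hp
    rw [any_and_const, years_any_short _ (by simp)]
    simp [PySem.Chars.slice_eq_listSlice, PySem.List.slice_from_neg_ofNat _ 4 (by omega)]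
  -- base name of length ≥ 4: A's year loop is B's last-four-characters test
  · have hp : pre = t.reverse ++ [a, b, c, d] := by
      have := congrArg List.reverse hr
      simpa using this
    subst hp
    rw [any_and_const, years_any_eq]
    have hy4 : PySem.Chars.slice (t.reverse ++ [a, b, c, d]) (some (-4)) none = [a, b, c, d] := by
      rw [PySem.Chars.slice_eq_listSlice, PySem.List.slice_from_neg_ofNat _ 4 (by omega)]
      simp
    rw [hy4]
    have hy3 : PySem.Chars.slice [a, b, c, d] none (some 3) = [a, b, c] := by
      rfl
    rw [hy3]
    have hd : PySem.List.pyGetD [a, b, c, d] 3 ' ' = d := by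
      rfl
    rw [hd]
    cases hok : ((([a,b,c] == "199".toList || [a,b,c] == "200".toList || [a,b,c] == "201".toList) && PySem.Chars.isdigit d)
        || ([a,b,c] == "202".toList && PySem.Chars.isIn [d] "01234".toList))
    · simp
    · simp

-- ===== VERDICT (by name: the statement is the Claim_ definition above) =====
theorem es_nombre_valido_py_spec : Claim_equal_es_nombre_valido_py := by
  intro s _
  exact main_eq s
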